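-- pv_equiv track=rewrite | github.com/hmnhGeek/Data-Structures-Algorithms | Searching and Sorting/paratha_spoj.py | can_be_cooked
-- ===== SOURCE A (Python) =====
-- def can_be_cooked(num_parathas_required, time_allowed, cook_ranks):
--     parathas_cooked_till_now = 0
--     cook_index = 0
--
--     while cook_index < len(cook_ranks) and parathas_cooked_till_now < num_parathas_required:
--         cook_rank = cook_ranks[cook_index]
--         time_taken = cook_rank
--         parathas_cooked = 0
--
--         while time_taken <= time_allowed:
--             parathas_cooked += 1
--             time_taken += cook_rank*(parathas_cooked + 1)
--
--         cook_index += 1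
--         parathas_cooked_till_now += parathas_cooked
--
--     return parathas_cooked_till_now >= num_parathas_required
-- ===== SOURCE B (Python) =====
-- def can_be_cooked(num_parathas_required, time_allowed, cook_ranks):
--     # Per cook of rank r, p parathas take r*p*(p+1)//2 time; binary-search the
--     # largest p with r*p*(p+1) <= 2*time_allowed instead of counting one by one.
--     total = 0
--     for r in cook_ranks:
--         if 0 < r <= time_allowed:
--             lo, hi = 1, time_allowed + 1
--             while hi - lo > 1:
--                 mid = (lo + hi) // 2
--                 if r * mid * (mid + 1) <= 2 * time_allowed:
--                     lo = mid
--                 else: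
--                     hi = mid
--             total += lo
--         if total >= num_parathas_required:
--             return True
--     return total >= num_parathas_required
-- ===== Notes on version B (the rewrite author's own statement) =====
-- stated objective: alternative
-- what changed: Per cook, A counts parathas one by one with a running cumulative time; B instead binary-searches the largest p with r*p*(p+1) <= 2*T and returns True as soon as the running total reaches the target.
-- outside the precondition, e.g. on can_be_cooked(1, 10, [1, -5]): A returns True, B returns True
import Mathlib
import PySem

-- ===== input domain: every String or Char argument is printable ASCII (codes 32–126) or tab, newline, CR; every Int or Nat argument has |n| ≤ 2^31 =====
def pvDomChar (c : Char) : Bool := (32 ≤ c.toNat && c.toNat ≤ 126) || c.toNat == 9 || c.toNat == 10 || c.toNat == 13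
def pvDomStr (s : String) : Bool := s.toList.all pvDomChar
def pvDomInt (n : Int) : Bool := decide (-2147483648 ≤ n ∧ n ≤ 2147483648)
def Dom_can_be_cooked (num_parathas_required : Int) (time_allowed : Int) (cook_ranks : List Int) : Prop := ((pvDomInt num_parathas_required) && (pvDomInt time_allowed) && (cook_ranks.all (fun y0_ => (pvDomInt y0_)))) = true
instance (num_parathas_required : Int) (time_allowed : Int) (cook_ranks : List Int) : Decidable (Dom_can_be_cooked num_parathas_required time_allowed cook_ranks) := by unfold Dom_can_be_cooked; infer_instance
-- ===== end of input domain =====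

-- B computes each cook's paratha count by binary search for the largest p with
-- r*p*(p+1) ≤ 2*T, instead of A's one-by-one counting loop.

-- ===== PORT A =====
-- inner while loop of A; fuel bounds the iteration count (it is sufficient on Pre_,
-- where the Python loop terminates); state is (time_taken, parathas_cooked)
def innerA (cook_rank time_allowed : Int) : Nat → Int → Int → Int
  | 0, _, parathas_cooked => parathas_cooked
  | fuel + 1, time_taken, parathas_cooked =>
      if time_taken ≤ time_allowed then
        innerA cook_rank time_allowed fuel
          (time_taken + cook_rank * ((parathas_cooked + 1) + 1)) (parathas_cooked + 1)
      else parathas_cooked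

-- outer while loop of A over the cooks, accumulating parathas_cooked_till_now
def loopA (num_parathas_required time_allowed : Int) : List Int → Int → Int
  | [], total => total
  | cook_rank :: rest, total =>
      if total < num_parathas_required then
        loopA num_parathas_required time_allowed rest
          (total + innerA cook_rank time_allowed (time_allowed.toNat + 1) cook_rank 0)
      else total

def can_be_cooked (num_parathas_required : Int) (time_allowed : Int) (cook_ranks : List Int) : Bool :=
  decide (num_parathas_required ≤ loopA num_parathas_required time_allowed cook_ranks 0)

-- ===== PORT B =====
-- midpoint of Python's (lo + hi) // 2 lies strictly between lo and hi (termination of bsearch)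
theorem pv_mid_bounds {lo hi : Int} (h : 1 < hi - lo) :
    lo < PySem.Int.floordiv (lo + hi) 2 ∧ PySem.Int.floordiv (lo + hi) 2 < hi := by
  rw [PySem.Int.floordiv_eq_ediv_of_pos (by omega : (0:Int) < 2)]
  omega

-- B's while loop: binary search for the largest p with r*p*(p+1) ≤ 2*T,
-- invariant: predicate holds at lo, fails at hi
def bsearch (r T lo hi : Int) : Int :=
  if h : 1 < hi - lo then
    if r * (PySem.Int.floordiv (lo + hi) 2) * (PySem.Int.floordiv (lo + hi) 2 + 1) ≤ 2 * T then
      bsearch r T (PySem.Int.floordiv (lo + hi) 2) hi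
    else
      bsearch r T lo (PySem.Int.floordiv (lo + hi) 2)
  else lo
termination_by (hi - lo).toNat
decreasing_by
  · have := pv_mid_bounds h; omega
  · have := pv_mid_bounds h; omega

-- B's for loop over the cooks, with the early `return True`
def loopB (num_parathas_required T : Int) : List Int → Int → Bool
  | [], total => decide (num_parathas_required ≤ total)
  | r :: rest, total =>
      let total' := if 0 < r ∧ r ≤ T then total + bsearch r T 1 (T + 1) else total
      if num_parathas_required ≤ total' then true
      else loopB num_parathas_required T rest total'

def can_be_cooked_alt (num_parathas_required : Int) (time_allowed : Int) (cook_ranks : List Int) : Bool :=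
  loopB num_parathas_required time_allowed cook_ranks 0

-- ===== PRECONDITION & SPEC =====
-- Pre_ excludes inputs containing a cook rank r ≤ 0 with r ≤ time_allowed: on those A's
-- inner loop never terminates (it diverges), except when an earlier prefix of cooks has
-- already reached the target, where A happens to return before touching the bad cook.
def Pre_can_be_cooked (num_parathas_required : Int) (time_allowed : Int) (cook_ranks : List Int) : Prop :=
  ∀ r ∈ cook_ranks, 0 < r ∨ time_allowed < r
instance (num_parathas_required : Int) (time_allowed : Int) (cook_ranks : List Int) : Decidable (Pre_can_be_cooked num_parathas_required time_allowed cook_ranks) := by unfold Pre_can_be_cooked; infer_instance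
def pvWitness_can_be_cooked : Int × Int × List Int := (3, 10, [1, 2])

def Spec_can_be_cooked (num_parathas_required : Int) (time_allowed : Int) (cook_ranks : List Int) (out : Bool) : Prop := out = can_be_cooked_alt num_parathas_required time_allowed cook_ranks
instance (num_parathas_required : Int) (time_allowed : Int) (cook_ranks : List Int) (out : Bool) : Decidable (Spec_can_be_cooked num_parathas_required time_allowed cook_ranks out) := by unfold Spec_can_be_cooked; infer_instance

-- ===== CLAIM (what is proved, stated in full; the proofs are below) =====
def Claim_equal_can_be_cooked : Prop := ∀ (num_parathas_required : Int) (time_allowed : Int) (cook_ranks : List Int), Dom_can_be_cooked num_parathas_required time_allowed cook_ranks → Pre_can_be_cooked num_parathas_required time_allowed cook_ranks → Spec_can_be_cooked num_parathas_required time_allowed cook_ranks (can_be_cooked num_parathas_required time_allowed cook_ranks)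

-- ===== LEMMAS AND PROOFS =====

-- p is the number of parathas a cook of rank r finishes within time T:
-- r*p*(p+1)/2 ≤ T and r*(p+1)*(p+2)/2 > T
def Good (r T p : Int) : Prop := 0 ≤ p ∧ r * p * (p + 1) ≤ 2 * T ∧ 2 * T < r * (p + 1) * (p + 2)

theorem good_unique {r T p q : Int} (hr : 1 ≤ r) (hp : Good r T p) (hq : Good r T q) : p = q := by
  obtain ⟨hp0, hp1, hp2⟩ := hp
  obtain ⟨hq0, hq1, hq2⟩ := hq
  by_contra hne
  rcases lt_or_gt_of_ne hne with h | h
  · have h1 : p + 1 ≤ q := by omega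
    nlinarith [mul_le_mul_of_nonneg_left (mul_le_mul h1 (by omega : p + 2 ≤ q + 1) (by omega) hq0) (by omega : (0:Int) ≤ r)]
  · have h1 : q + 1 ≤ p := by omega
    nlinarith [mul_le_mul_of_nonneg_left (mul_le_mul h1 (by omega : q + 2 ≤ p + 1) (by omega) hp0) (by omega : (0:Int) ≤ r)]

theorem innerA_good (r T : Int) (hr : 1 ≤ r) :
    ∀ (fuel : Nat) (time p : Int), 0 ≤ p → 2 * time = r * (p + 1) * (p + 2) →
      r * p * (p + 1) ≤ 2 * T → T < (fuel : Int) + p →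
      Good r T (innerA r T fuel time p) := by
  intro fuel
  induction fuel with
  | zero =>
      intro time p hp0 htime hle hfuel
      simp only [innerA]
      refine ⟨hp0, hle, ?_⟩
      have hpT : T < p := by simpa using hfuel
      nlinarith [mul_le_mul_of_nonneg_right hr (show (0:Int) ≤ (p + 1) * (p + 2) by nlinarith), sq_nonneg p]
  | succ f ih =>
      intro time p hp0 htime hle hfuel
      simp only [innerA]
      split_ifs with h
      · refine ih _ (p + 1) (by omega) (by linear_combination htime) (by linarith) (by push_cast at hfuel ⊢; omega)
      · exact ⟨hp0, hle, by omega⟩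

theorem innerA_nonneg (r T : Int) : ∀ (fuel : Nat) (time p : Int), 0 ≤ p → 0 ≤ innerA r T fuel time p := by
  intro fuel
  induction fuel with
  | zero => intro time p hp; simpa [innerA] using hp
  | succ f ih =>
      intro time p hp
      simp only [innerA]
      split_ifs with h
      · exact ih _ _ (by omega)
      · exact hp

theorem bsearch_good (r T : Int) (hr : 1 ≤ r) :
    ∀ (g : Nat) (lo hi : Int), (hi - lo).toNat ≤ g → 1 ≤ lo → lo < hi →
      r * lo * (lo + 1) ≤ 2 * T → 2 * T < r * hi * (hi + 1) →
      Good r T (bsearch r T lo hi) := by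
  intro g
  induction g with
  | zero => intro lo hi hg hlo hlt _ _; omega
  | succ g ih =>
      intro lo hi hg hlo hlt hloP hhiP
      rw [bsearch]
      split_ifs with h1 h2
      · have hm := pv_mid_bounds h1
        exact ih _ _ (by omega) (by omega) hm.2 h2 hhiP
      · have hm := pv_mid_bounds h1
        exact ih _ _ (by omega) hlo hm.1 hloP (by omega)
      · have hhi : hi = lo + 1 := by omega
        refine ⟨by omega, hloP, ?_⟩
        rw [hhi] at hhiP
        linarith [hhiP]

-- per-cook equality: A's counting loop and B's (guarded) binary search compute the same cap
theorem cap_eq (r T : Int) (hpre : 0 < r ∨ T < r) :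
    innerA r T (T.toNat + 1) r 0 = (if 0 < r ∧ r ≤ T then bsearch r T 1 (T + 1) else 0) := by
  split_ifs with h
  · obtain ⟨hr, hrT⟩ := h
    have hr1 : (1:Int) ≤ r := hr
    have hT1 : (1:Int) ≤ T := le_trans hr1 hrT
    have hA : Good r T (innerA r T (T.toNat + 1) r 0) := by
      refine innerA_good r T hr1 _ r 0 le_rfl (by ring) (by simp; linarith) ?_
      push_cast; omega
    have hB : Good r T (bsearch r T 1 (T + 1)) := by
      refine bsearch_good r T hr1 (T + 1 - 1).toNat 1 (T + 1) le_rfl le_rfl (by omega)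
        (by linarith) ?_
      nlinarith [mul_le_mul_of_nonneg_right hr1 (show (0:Int) ≤ (T + 1) * (T + 2) by nlinarith), sq_nonneg T]
    exact good_unique hr1 hA hB
  · -- here T < r, so A's inner loop exits immediately with 0 parathas
    have hTr : T < r := by omega
    simp [innerA, not_le.mpr hTr]

theorem loopA_ge (N T : Int) : ∀ (l : List Int) (total : Int), total ≤ loopA N T l total := by
  intro l
  induction l with
  | nil => intro total; simp [loopA]
  | cons r rest ih =>
      intro total
      simp only [loopA]
      split_ifs with h
      · have h1 := innerA_nonneg r T (T.toNat + 1) r 0 le_rfl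
        have := ih (total + innerA r T (T.toNat + 1) r 0)
        omega
      · exact le_rfl

theorem loop_eq (N T : Int) : ∀ (l : List Int) (total : Int), (∀ r ∈ l, 0 < r ∨ T < r) →
    decide (N ≤ loopA N T l total) = loopB N T l total := by
  intro l
  induction l with
  | nil => intro total _; simp [loopA, loopB]
  | cons r rest ih =>
      intro total hpre
      have hcap := cap_eq r T (hpre r (by simp))
      have hnn := innerA_nonneg r T (T.toNat + 1) r 0 le_rfl
      simp only [loopA, loopB]
      rw [show (if 0 < r ∧ r ≤ T then total + bsearch r T 1 (T + 1) else total)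
            = total + innerA r T (T.toNat + 1) r 0 from by rw [hcap]; split_ifs <;> ring]
      split_ifs with h1 h2
      · -- total < N and N ≤ total + cap: A's loop result is ≥ total + cap ≥ N
        have := loopA_ge N T rest (total + innerA r T (T.toNat + 1) r 0)
        simp only [decide_eq_true_eq]
        omega
      · exact ih _ (fun x hx => hpre x (by simp [hx]))
      · simp only [decide_eq_true_eq]; omega
      · -- N ≤ total: A stops; B's total' = total + c ≥ N too, contradiction with the guard
        exfalso; omega

-- ===== VERDICT (by name: the statement is the Claim_ definition above) =====
theorem can_be_cooked_spec : Claim_equal_can_be_cooked := by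
  intro n T ranks _ hpre
  unfold Spec_can_be_cooked can_be_cooked can_be_cooked_alt
  exact loop_eq n T ranks 0 hpre
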